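-- pv_equiv track=rewrite | github.com/code4aLiving/data_structures_algorithms | Excercises/nominating-group-leader2.py | solve
-- ===== SOURCE A (Python) =====
-- memory = {}
--
-- def solve(n,v,groups):
--     res = []
--     for (l,r,x) in groups:
--         if (l,r) in memory:
--             votes = memory[(l,r)]
--         else:
--             votes = {}
--             for i in range(l,r+1):
--                 votes[v[i]] = votes.setdefault(v[i],0) + 1
--                 #if (l,i) not in memory:
--                     #memory[(l,i)] = dict(votes)
--
--         winner = -1
--         for student,vote in votes.items():
--             if vote == x:
--                 if winner < 0 or winner > student:
--                     winner = student
--         res.append(winner)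
--     return res
-- ===== SOURCE B (Python) =====
-- def solve(n, v, groups):
--     res = []
--     for (l, r, x) in groups:
--         seg = sorted(v[i] for i in range(l, r + 1))
--         res.append(first_run_value(seg, x))
--     return res
--
-- def first_run_value(seg, x):
--     # scan maximal runs of equal values in the sorted segment;
--     # the first run of length exactly x is the smallest such value
--     i = 0
--     while i < len(seg):
--         j = i
--         while j < len(seg) and seg[j] == seg[i]:
--             j += 1
--         if j - i == x:
--             return seg[i]
--         i = j
--     return -1
-- ===== Notes on version B (the rewrite author's own statement) =====
-- stated objective: alternative
-- what changed: Per query B sorts the segment and scans maximal runs of equal values, returning the value of the first run of length exactly x (automatically the smallest such value), instead of A's counting dict followed by a fold over its items; Pre_ excludes queries whose segment contains a negative value occurring exactly x times, where A's answer collides with its -1 'no winner' sentinel and becomes an artefact of dict insertion order, while B returns the smallest such value.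
-- outside the precondition, e.g. on solve(2, [-2, 5], [(0, 1, 1)]): A returns [5], B returns [-2]
import Mathlib
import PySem

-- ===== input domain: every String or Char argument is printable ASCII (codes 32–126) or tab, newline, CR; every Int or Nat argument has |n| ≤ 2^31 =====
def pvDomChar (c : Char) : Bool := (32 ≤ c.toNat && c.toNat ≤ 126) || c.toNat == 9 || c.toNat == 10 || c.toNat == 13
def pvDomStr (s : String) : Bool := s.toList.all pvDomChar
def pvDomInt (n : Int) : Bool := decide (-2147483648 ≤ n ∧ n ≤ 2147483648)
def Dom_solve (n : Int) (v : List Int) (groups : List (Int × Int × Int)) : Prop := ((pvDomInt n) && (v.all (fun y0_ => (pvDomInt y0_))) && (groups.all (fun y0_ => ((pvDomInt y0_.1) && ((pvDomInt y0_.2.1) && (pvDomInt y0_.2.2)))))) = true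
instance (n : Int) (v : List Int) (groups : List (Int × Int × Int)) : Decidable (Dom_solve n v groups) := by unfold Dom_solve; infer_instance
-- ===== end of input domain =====

-- B replaces A's per-query counting dict + fold over its items by sort-the-segment +
-- first run of length x (an alternative algorithm of similar cost, not claimed faster);
-- Pre_ excludes A's IndexErrors and the negative-candidate corner described above Pre_.


-- ===== PORT A =====
-- the module-level 'memory' dict is never written (the write is commented out in the
-- source), so the '(l,r) in memory' branch never fires and is not ported.
-- one loop step: votes[v[i]] = votes.setdefault(v[i],0) + 1 (setdefault runs first,
-- then the assignment overwrites in place)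
def solveStep (v : List Int) (d : PySem.Dict Int Int) (i : Int) : PySem.Dict Int Int :=
  let s := PySem.List.pyGetD v i 0
  let d1 := d.setdefault s 0
  d1.insert s (d1.getD s 0 + 1)

def solve (n : Int) (v : List Int) (groups : List (Int × Int × Int)) : List Int :=
  groups.foldl (fun res g =>
    let votes := (PySem.List.pyRange g.1 (g.2.1 + 1) 1).foldl (solveStep v) PySem.Dict.empty
    let winner := votes.items.foldl
      (fun w p => if p.2 = g.2.2 then (if w < 0 ∨ w > p.1 then p.1 else w) else w) (-1)
    res ++ [winner]) []

-- ===== PORT B =====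
-- first_run_value: the outer while advances run by run over the sorted segment; the
-- inner 'while seg[j] == seg[i]' is the run's takeWhile, 'i = j' the matching dropWhile.
def firstRunValue (seg : List Int) (x : Int) : Int :=
  match seg with
  | [] => -1
  | a :: t =>
      if (1 + (t.takeWhile (fun b => b = a)).length : Int) = x then a
      else firstRunValue (t.dropWhile (fun b => b = a)) x
  termination_by seg.length
  decreasing_by
    simp only [List.length_cons]
    exact Nat.lt_succ_of_le (List.length_dropWhile_le _ _)

def solve_alt (n : Int) (v : List Int) (groups : List (Int × Int × Int)) : List Int :=
  groups.foldl (fun res g =>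
    let seg := PySem.List.sorted ((PySem.List.pyRange g.1 (g.2.1 + 1) 1).map
                 (fun i => PySem.List.pyGetD v i 0)) (fun s => s) false
    res ++ [firstRunValue seg g.2.2]) []

-- ===== PRECONDITION & SPEC =====
-- the multiset of values the query (l,r) reads (Python wraps a negative index)
def preSeg (v : List Int) (l r : Int) : List Int :=
  (PySem.List.pyRange l (r + 1) 1).map (fun i => PySem.List.pyGetD v i 0)

-- Pre_ excludes (a) queries indexing v out of range, where A raises IndexError, and
-- (b) queries whose segment contains a negative value occurring exactly x times: there
-- A's answer collides with its -1 'no winner' sentinel and is an artefact of dict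
-- insertion order (B returns the smallest such value).
def Pre_solve (n : Int) (v : List Int) (groups : List (Int × Int × Int)) : Prop :=
  ∀ g ∈ groups, (g.1 ≤ g.2.1 → -(v.length : Int) ≤ g.1 ∧ g.2.1 < (v.length : Int)) ∧
    (∀ s ∈ preSeg v g.1 g.2.1, s < 0 → ((preSeg v g.1 g.2.1).count s : Int) ≠ g.2.2)

instance (n : Int) (v : List Int) (groups : List (Int × Int × Int)) : Decidable (Pre_solve n v groups) := by unfold Pre_solve; infer_instance

def pvWitness_solve : Int × List Int × (List (Int × Int × Int)) := (3, [1, 0, 1], [(0, 2, 2)])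

def Spec_solve (n : Int) (v : List Int) (groups : List (Int × Int × Int)) (out : List Int) : Prop := out = solve_alt n v groups
instance (n : Int) (v : List Int) (groups : List (Int × Int × Int)) (out : List Int) : Decidable (Spec_solve n v groups out) := by unfold Spec_solve; infer_instance

-- ===== CLAIM (what is proved, stated in full; the proofs are below) =====
def Claim_equal_solve : Prop := ∀ (n : Int) (v : List Int) (groups : List (Int × Int × Int)), Dom_solve n v groups → Pre_solve n v groups → Spec_solve n v groups (solve n v groups)

-- ===== LEMMAS AND PROOFS =====

theorem pv_witness_ok : Dom_solve pvWitness_solve.1 pvWitness_solve.2.1 pvWitness_solve.2.2 ∧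
    Pre_solve pvWitness_solve.1 pvWitness_solve.2.1 pvWitness_solve.2.2 := by decide

-- the common characterisation: R is the answer for the query multiset u and target x
def IsAns (u : List Int) (x R : Int) : Prop :=
  (R = -1 ∧ ∀ s ∈ u, (u.count s : Int) ≠ x) ∨
  (R ∈ u ∧ (u.count R : Int) = x ∧ ∀ s ∈ u, (u.count s : Int) = x → R ≤ s)

theorem IsAns_unique {u : List Int} {x R1 R2 : Int} (h1 : IsAns u x R1) (h2 : IsAns u x R2) : R1 = R2 := by
  rcases h1 with ⟨e1, n1⟩ | ⟨m1, c1, l1⟩ <;> rcases h2 with ⟨e2, n2⟩ | ⟨m2, c2, l2⟩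
  · omega
  · exact absurd c2 (n1 _ m2)
  · exact absurd c1 (n2 _ m1)
  · exact le_antisymm (l1 _ m2 c2) (l2 _ m1 c1)

theorem IsAns_perm {u w : List Int} {x R : Int} (hp : u.Perm w) (h : IsAns u x R) : IsAns w x R := by
  rcases h with ⟨e, n⟩ | ⟨m, c, l⟩
  · exact Or.inl ⟨e, fun s hs => by rw [← hp.count_eq]; exact n s (hp.mem_iff.2 hs)⟩
  · exact Or.inr ⟨hp.mem_iff.1 m, by rw [← hp.count_eq]; exact c,
      fun s hs hc => l s (hp.mem_iff.2 hs) (by rw [hp.count_eq]; exact hc)⟩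

theorem not_mem_dropWhile_run (a : Int) :
    ∀ t : List Int, (∀ s ∈ t, a ≤ s) → t.Pairwise (· ≤ ·) →
      a ∉ t.dropWhile (fun b => decide (b = a)) := by
  intro t
  induction t with
  | nil => simp
  | cons c t' ih =>
    intro hle hpw
    rcases List.pairwise_cons.1 hpw with ⟨hc, hpt'⟩
    by_cases hca : c = a
    · rw [List.dropWhile_cons_of_pos (by simp [hca])]
      exact ih (fun s hs => hle s (List.mem_cons_of_mem _ hs)) hpt'
    · rw [List.dropWhile_cons_of_neg (by simp [hca])]
      intro hmem
      rcases List.mem_cons.1 hmem with rfl | hmem'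
      · exact hca rfl
      · exact hca (le_antisymm (hc a hmem') (hle c List.mem_cons_self))

theorem count_head_run (a : Int) (t : List Int) (hle : ∀ s ∈ t, a ≤ s) (hpt : t.Pairwise (· ≤ ·)) :
    (a :: t).count a = 1 + (t.takeWhile (fun b => decide (b = a))).length := by
  have hsplit := List.takeWhile_append_dropWhile (p := fun b => decide (b = a)) (l := t)
  have h1 : (t.takeWhile (fun b => decide (b = a))).count a
      = (t.takeWhile (fun b => decide (b = a))).length :=
    List.count_eq_length.2 (fun b hb => (by simpa using List.mem_takeWhile_imp hb : b = a).symm)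
  have h2 : (t.dropWhile (fun b => decide (b = a))).count a = 0 :=
    List.count_eq_zero.2 (not_mem_dropWhile_run a t hle hpt)
  calc (a :: t).count a = t.count a + 1 := List.count_cons_self ..
    _ = ((t.takeWhile (fun b => decide (b = a)) ++ t.dropWhile (fun b => decide (b = a))).count a) + 1 := by rw [hsplit]
    _ = 1 + (t.takeWhile (fun b => decide (b = a))).length := by
        rw [List.count_append, h1, h2]; omega

theorem count_ne_head (a b : Int) (hba : b ≠ a) (t : List Int) :
    (a :: t).count b = (t.dropWhile (fun b => decide (b = a))).count b := by
  have hsplit := List.takeWhile_append_dropWhile (p := fun b => decide (b = a)) (l := t)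
  have h1 : (t.takeWhile (fun b => decide (b = a))).count b = 0 :=
    List.count_eq_zero.2 (fun hmem => hba (by simpa using List.mem_takeWhile_imp hmem))
  calc (a :: t).count b = t.count b := by
        rw [List.count_cons]; simp [Ne.symm hba]
    _ = (t.takeWhile (fun b => decide (b = a)) ++ t.dropWhile (fun b => decide (b = a))).count b := by rw [hsplit]
    _ = _ := by rw [List.count_append, h1]; omega

theorem isAns_firstRunValue (x : Int) (u : List Int) (hpw : u.Pairwise (· ≤ ·)) :
    IsAns u x (firstRunValue u x) := by
  induction u using firstRunValue.induct x with
  | case1 => exact Or.inl ⟨by simp [firstRunValue], by simp⟩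
  | case2 a t hx =>
    rcases List.pairwise_cons.1 hpw with ⟨hle, hpt⟩
    have hcnt : (((a :: t).count a : Int)) = x := by
      rw [count_head_run a t hle hpt]; push_cast; omega
    rw [firstRunValue, if_pos hx]
    exact Or.inr ⟨List.mem_cons_self, hcnt,
      fun s hs _ => by rcases List.mem_cons.1 hs with rfl | hs
                       · exact le_rfl
                       · exact hle s hs⟩
  | case3 a t hx ih =>
    rcases List.pairwise_cons.1 hpw with ⟨hle, hpt⟩
    have hrest : (t.dropWhile (fun b => decide (b = a))).Pairwise (· ≤ ·) :=
      hpt.sublist (List.dropWhile_sublist _)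
    have ih' := ih hrest
    have hnotina := not_mem_dropWhile_run a t hle hpt
    have hca : ((a :: t).count a : Int) ≠ x := by
      rw [count_head_run a t hle hpt]; push_cast at hx ⊢; omega
    have hsub : (t.dropWhile (fun b => decide (b = a))).Sublist (a :: t) :=
      ((List.dropWhile_sublist _)).trans (List.sublist_cons_self _ _)
    rw [firstRunValue, if_neg hx]
    rcases ih' with ⟨e, n⟩ | ⟨m, c, l⟩
    · refine Or.inl ⟨e, fun s hs hcnt => ?_⟩
      by_cases hsa : s = a
      · exact hca (hsa ▸ hcnt)
      · rcases List.mem_cons.1 hs with rfl | hst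
        · exact hca hcnt
        · have hsrest : s ∈ t.dropWhile (fun b => decide (b = a)) := by
            by_contra hno
            have : s ∈ t.takeWhile (fun b => decide (b = a)) := by
              have := List.takeWhile_append_dropWhile (p := fun b => decide (b = a)) (l := t)
              rw [← this] at hst
              rcases List.mem_append.1 hst with h | h
              · exact h
              · exact absurd h hno
            exact hsa (by simpa using List.mem_takeWhile_imp this)
          exact n s hsrest (by rw [← count_ne_head a s hsa t]; exact hcnt)
    · have hRa : firstRunValue (t.dropWhile (fun b => decide (b = a))) x ≠ a := by
        intro h; rw [h] at m; exact hnotina m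
      refine Or.inr ⟨hsub.mem m, ?_, ?_⟩
      · rw [count_ne_head a _ hRa t]; exact c
      · intro s hs hcnt
        by_cases hsa : s = a
        · exact absurd (hsa ▸ hcnt) hca
        · rcases List.mem_cons.1 hs with rfl | hst
          · exact absurd hcnt hca
          · have hsrest : s ∈ t.dropWhile (fun b => decide (b = a)) := by
              by_contra hno
              have hmem : s ∈ t.takeWhile (fun b => decide (b = a)) := by
                have hw := List.takeWhile_append_dropWhile (p := fun b => decide (b = a)) (l := t)
                rw [← hw] at hst
                rcases List.mem_append.1 hst with h | h
                · exact h
                · exact absurd h hno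
              exact absurd (by simpa using List.mem_takeWhile_imp hmem) hsa
            exact l s hsrest (by rw [← count_ne_head a s hsa t]; exact hcnt)

theorem foldl_min_mem (t : List Int) : ∀ w : Int, t.foldl min w ∈ w :: t := by
  induction t with
  | nil => simp
  | cons c t' ih =>
    intro w
    rcases List.mem_cons.1 (ih (min w c)) with h | h
    · rcases min_choice w c with hm | hm <;> rw [List.foldl_cons, h, hm]
      · exact List.mem_cons_self
      · exact List.mem_cons_of_mem _ List.mem_cons_self
    · exact List.mem_cons_of_mem _ (List.mem_cons_of_mem _ h)

theorem foldl_min_le (t : List Int) : ∀ w a : Int, a ∈ w :: t → t.foldl min w ≤ a := by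
  induction t with
  | nil => intro w a ha; simp at ha; simp [ha]
  | cons c t' ih =>
    intro w a ha
    rw [List.foldl_cons]
    rcases List.mem_cons.1 ha with rfl | ha'
    · exact le_trans (ih _ _ List.mem_cons_self) (min_le_left _ _)
    · rcases List.mem_cons.1 ha' with rfl | ha''
      · exact le_trans (ih _ _ List.mem_cons_self) (min_le_right _ _)
      · exact ih _ _ (List.mem_cons_of_mem _ ha'')

theorem foldl_wstep_nonneg (t : List Int) : ∀ w : Int, 0 ≤ w → (∀ c ∈ t, 0 ≤ c) →
    t.foldl (fun w k => if w < 0 ∨ w > k then k else w) w = t.foldl min w := by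
  induction t with
  | nil => intro w _ _; rfl
  | cons c t' ih =>
    intro w hw hc
    have hc0 : (0:Int) ≤ c := hc c List.mem_cons_self
    have : (if w < 0 ∨ w > c then c else w) = min w c := by
      by_cases h : w ≤ c
      · rw [if_neg (by omega), min_eq_left h]
      · rw [if_pos (Or.inr (by omega)), min_eq_right (by omega)]
    rw [List.foldl_cons, List.foldl_cons, this]
    exact ih _ (le_min hw hc0) (fun d hd => hc d (List.mem_cons_of_mem _ hd))

theorem isAns_wfold (seg : List Int) (x : Int)
    (H : ∀ s ∈ seg, s < 0 → ((seg.count s : Int)) ≠ x) :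
    IsAns seg x ((PySem.Set.ofList seg).foldl
      (fun w k => if ((seg.count k : Int)) = x then (if w < 0 ∨ w > k then k else w) else w) (-1)) := by
  have hfil : (PySem.Set.ofList seg).foldl
      (fun w k => if ((seg.count k : Int)) = x then (if w < 0 ∨ w > k then k else w) else w) (-1)
      = ((PySem.Set.ofList seg).filter (fun k => decide ((seg.count k : Int) = x))).foldl
          (fun w k => if w < 0 ∨ w > k then k else w) (-1) := by
    rw [List.foldl_filter]
    apply PySem.List.foldl_congr_mem
    intro acc k _
    by_cases h : ((seg.count k : Int)) = x <;> simp [h]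
  set F := (PySem.Set.ofList seg).filter (fun k => decide ((seg.count k : Int) = x)) with hF
  have hmemF : ∀ k, k ∈ F ↔ k ∈ seg ∧ ((seg.count k : Int)) = x := by
    intro k
    rw [hF, List.mem_filter, PySem.Set.mem_ofList]
    simp
  rw [hfil]
  match hFe : F with
  | [] =>
    exact Or.inl ⟨rfl, fun s hs hc => absurd ((hmemF s).2 ⟨hs, hc⟩) (List.not_mem_nil)⟩
  | c :: t =>
    have hcF : c ∈ c :: t := List.mem_cons_self
    have hnn : ∀ k ∈ c :: t, (0:Int) ≤ k := by
      intro k hk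
      rcases (hmemF k).1 hk with ⟨hks, hkc⟩
      by_contra hneg
      exact H k hks (by omega) hkc
    have hstep1 : (List.foldl (fun w k => if w < 0 ∨ w > k then k else w) (-1) (c :: t))
        = t.foldl (fun w k => if w < 0 ∨ w > k then k else w) c := by
      rw [List.foldl_cons]; norm_num
    rw [hstep1, foldl_wstep_nonneg t c (hnn c hcF)
      (fun d hd => hnn d (List.mem_cons_of_mem _ hd))]
    rcases (hmemF _).1 (foldl_min_mem t c) with ⟨hRs, hRc⟩
    exact Or.inr ⟨hRs, hRc, fun s hs hc => foldl_min_le t c s ((hmemF s).2 ⟨hs, hc⟩)⟩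

theorem dstep_eq (d : PySem.Dict Int Int) (s : Int) :
    (d.setdefault s 0).insert s ((d.setdefault s 0).getD s 0 + 1) = d.modify s 0 (· + 1) := by
  by_cases hc : d.contains s = true
  · rw [PySem.Dict.setdefault_of_contains d 0 hc]; rfl
  · rw [PySem.Dict.setdefault_of_not_contains d 0 (by simpa using hc)]
    rw [PySem.Dict.getD_insert_self]
    have h1 : d.getD s 0 = 0 := by
      have := (PySem.Dict.get?_eq_none_iff_contains d s).2 (by simpa using hc)
      simp [PySem.Dict.getD, this]
    rw [PySem.Dict.modify, h1]
    rw [PySem.Dict.insert_insert_self]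

theorem votes_eq_counter (v : List Int) (l r : Int) :
    (PySem.List.pyRange l (r + 1) 1).foldl (solveStep v) PySem.Dict.empty
      = PySem.Dict.counter (preSeg v l r) := by
  rw [PySem.Dict.counter_eq_foldl, preSeg, List.foldl_map]
  apply PySem.List.foldl_congr_mem
  intro d i _
  exact dstep_eq d (PySem.List.pyGetD v i 0)

theorem query_eq (v : List Int) (l r x : Int)
    (H : ∀ s ∈ preSeg v l r, s < 0 → ((preSeg v l r).count s : Int) ≠ x) :
    ((PySem.List.pyRange l (r + 1) 1).foldl (solveStep v) PySem.Dict.empty).items.foldl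
        (fun w p => if p.2 = x then (if w < 0 ∨ w > p.1 then p.1 else w) else w) (-1)
      = firstRunValue (PySem.List.sorted (preSeg v l r) (fun s => s) false) x := by
  set seg := preSeg v l r with hseg
  have hA : ((PySem.List.pyRange l (r + 1) 1).foldl (solveStep v) PySem.Dict.empty).items.foldl
        (fun w p => if p.2 = x then (if w < 0 ∨ w > p.1 then p.1 else w) else w) (-1)
      = (PySem.Set.ofList seg).foldl
          (fun w k => if ((seg.count k : Int)) = x then (if w < 0 ∨ w > k then k else w) else w) (-1) := by
    rw [votes_eq_counter, PySem.Dict.items_counter, List.foldl_map]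
  have h1 : IsAns seg x (((PySem.List.pyRange l (r + 1) 1).foldl (solveStep v) PySem.Dict.empty).items.foldl
        (fun w p => if p.2 = x then (if w < 0 ∨ w > p.1 then p.1 else w) else w) (-1)) := by
    rw [hA]; exact isAns_wfold seg x H
  have hperm : (PySem.List.sorted seg (fun s => s) false).Perm seg :=
    PySem.List.sorted_perm seg (fun s => s) false
  have hpw : (PySem.List.sorted seg (fun s => s) false).Pairwise (· ≤ ·) := by
    have := PySem.List.sorted_pairwise (κ := Int) seg (fun s => s)
    simpa using this
  have h2 : IsAns seg x (firstRunValue (PySem.List.sorted seg (fun s => s) false) x) :=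
    IsAns_perm hperm (isAns_firstRunValue x _ hpw)
  exact IsAns_unique h1 h2

-- ===== VERDICT (by name: the statement is the Claim_ definition above) =====
theorem solve_spec : Claim_equal_solve := by
  intro n v groups _ hpre
  show solve n v groups = solve_alt n v groups
  unfold solve solve_alt
  rw [PySem.List.foldl_append_singleton_eq_map
      (f := fun g : Int × Int × Int =>
        ((PySem.List.pyRange g.1 (g.2.1 + 1) 1).foldl (solveStep v) PySem.Dict.empty).items.foldl
          (fun w p => if p.2 = g.2.2 then (if w < 0 ∨ w > p.1 then p.1 else w) else w) (-1)),
    PySem.List.foldl_append_singleton_eq_map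
      (f := fun g : Int × Int × Int =>
        firstRunValue (PySem.List.sorted ((PySem.List.pyRange g.1 (g.2.1 + 1) 1).map
          (fun i => PySem.List.pyGetD v i 0)) (fun s => s) false) g.2.2)]
  simp only [List.nil_append]
  apply List.map_congr_left
  intro g hg
  exact query_eq v g.1 g.2.1 g.2.2 (hpre g hg).2
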